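-- pv_equiv track=rewrite | github.com/sun-umn/PyGRANSO | pygranso/private/tablePrinter.py | moveSpanLabels
-- ===== SOURCE A (Python) =====
-- def moveSpanLabels(span_labels,indx,n_cols):
--     labels = []
--     count = 0
--     for i in range(n_cols):
--         if indx[i]:
--             labels.append(span_labels[count])
--             count += 1
--         else:
--             labels.append("")
--
--     return labels
-- ===== SOURCE B (Python) =====
-- def moveSpanLabels(span_labels, indx, n_cols):
--     # prefix-sum then gather: prefix[i] = number of True entries among indx[0..i),
--     # so each masked column reads its label directly as span_labels[prefix[i]],
--     # with no running counter interleaved with building the output.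
--     prefix = [0]
--     for i in range(n_cols):
--         prefix.append(prefix[i] + (1 if indx[i] else 0))
--     return [span_labels[prefix[i]] if indx[i] else "" for i in range(n_cols)]
-- ===== Notes on version B (the rewrite author's own statement) =====
-- stated objective: alternative
-- what changed: Replaces A's interleaved branch-and-count append loop with a prefix-sum-then-gather algorithm: first build the exclusive prefix counts of the mask, then produce the output as a stateless comprehension reading span_labels[prefix[i]] at each masked column.
import Mathlib
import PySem

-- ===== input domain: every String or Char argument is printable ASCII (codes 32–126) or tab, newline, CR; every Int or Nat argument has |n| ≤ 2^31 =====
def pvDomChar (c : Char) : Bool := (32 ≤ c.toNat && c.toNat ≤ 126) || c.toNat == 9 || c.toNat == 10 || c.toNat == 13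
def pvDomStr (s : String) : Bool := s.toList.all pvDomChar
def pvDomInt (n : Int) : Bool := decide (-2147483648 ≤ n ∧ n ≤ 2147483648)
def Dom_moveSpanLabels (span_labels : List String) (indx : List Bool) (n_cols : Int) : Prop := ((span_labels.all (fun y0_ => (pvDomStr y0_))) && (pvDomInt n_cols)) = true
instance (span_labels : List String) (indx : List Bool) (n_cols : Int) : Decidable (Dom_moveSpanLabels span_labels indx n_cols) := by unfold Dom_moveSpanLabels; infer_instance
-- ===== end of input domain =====

-- B replaces A's interleaved branch-and-count append loop with prefix-sum-then-gather:
-- build the exclusive prefix counts of the mask, then a stateless comprehension reads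
-- span_labels[prefix[i]] at each masked column; objective: alternative, same O(n) cost.

-- ===== PORT A =====
-- A's loop: one pass over range(n_cols), appending either the next span label or "".
def moveSpanLabels (span_labels : List String) (indx : List Bool) (n_cols : Int) : List String :=
  ((PySem.List.pyRange 0 n_cols 1).foldl
    (fun st i =>
      if PySem.List.pyGetD indx i false then
        (st.1 ++ [PySem.List.pyGetD span_labels st.2 ""], st.2 + 1)
      else
        (st.1 ++ [""], st.2))
    ([], 0)).1

-- ===== PORT B =====
-- B: prefix = [0]; for i in range(n_cols): prefix.append(prefix[i] + (1 if indx[i] else 0));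
--    return [span_labels[prefix[i]] if indx[i] else "" for i in range(n_cols)]
def moveSpanLabels_alt (span_labels : List String) (indx : List Bool) (n_cols : Int) : List String :=
  let pre :=
    (PySem.List.pyRange 0 n_cols 1).foldl
      (fun pr i =>
        pr ++ [PySem.List.pyGetD pr i 0 + (if PySem.List.pyGetD indx i false then 1 else 0)])
      [(0 : Int)]
  (PySem.List.pyRange 0 n_cols 1).map (fun i =>
    if PySem.List.pyGetD indx i false then
      PySem.List.pyGetD span_labels (PySem.List.pyGetD pre i 0) ""
    else "")

-- ===== PRECONDITION & SPEC =====
-- Pre_ excludes exactly the inputs where Python A raises IndexError: n_cols exceeding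
-- len(indx), or more true entries among the first n_cols than there are span labels.
def Pre_moveSpanLabels (span_labels : List String) (indx : List Bool) (n_cols : Int) : Prop :=
  n_cols ≤ 0 ∨ (n_cols ≤ (indx.length : Int) ∧ (indx.take n_cols.toNat).count true ≤ span_labels.length)
instance (span_labels : List String) (indx : List Bool) (n_cols : Int) : Decidable (Pre_moveSpanLabels span_labels indx n_cols) := by unfold Pre_moveSpanLabels; infer_instance

def pvWitness_moveSpanLabels : List String × List Bool × Int := (["a"], [true, false], 2)

def Spec_moveSpanLabels (span_labels : List String) (indx : List Bool) (n_cols : Int) (out : List String) : Prop := out = moveSpanLabels_alt span_labels indx n_cols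
instance (span_labels : List String) (indx : List Bool) (n_cols : Int) (out : List String) : Decidable (Spec_moveSpanLabels span_labels indx n_cols out) := by unfold Spec_moveSpanLabels; infer_instance

-- ===== CLAIM (what is proved, stated in full; the proofs are below) =====
def Claim_equal_moveSpanLabels : Prop := ∀ (span_labels : List String) (indx : List Bool) (n_cols : Int), Dom_moveSpanLabels span_labels indx n_cols → Pre_moveSpanLabels span_labels indx n_cols → Spec_moveSpanLabels span_labels indx n_cols (moveSpanLabels span_labels indx n_cols)

-- ===== LEMMAS AND PROOFS =====

-- the running count of true mask entries among indx[0..j) (as Python reads them)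
def pvCnt (indx : List Bool) : Nat → Int
  | 0 => 0
  | j + 1 => pvCnt indx j + (if PySem.List.pyGetD indx (j : Int) false then 1 else 0)

-- B's first pass computes exactly the prefix counts
lemma pvPrefix_eq (indx : List Bool) (m : Nat) :
    (PySem.List.pyRange 0 (m : Int) 1).foldl
      (fun pr i =>
        pr ++ [PySem.List.pyGetD pr i 0 + (if PySem.List.pyGetD indx i false then 1 else 0)])
      [(0 : Int)]
    = (List.range (m + 1)).map (pvCnt indx) := by
  induction m with
  | zero => simp [pvCnt]
  | succ m ih =>
    have hsucc : PySem.List.pyRange 0 ((m + 1 : Nat) : Int) 1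
        = PySem.List.pyRange 0 (m : Int) 1 ++ [(m : Int)] := by
      push_cast
      exact PySem.List.pyRange_one_succ_right (by positivity)
    rw [hsucc, List.foldl_append, ih, List.foldl_cons, List.foldl_nil]
    have hget : PySem.List.pyGetD ((List.range (m + 1)).map (pvCnt indx)) (m : Int) 0
        = pvCnt indx m := by
      rw [PySem.List.pyGetD_natCast]
      simp [List.getD]
    rw [hget]
    rw [show m + 1 + 1 = (m + 1) + 1 from rfl, List.range_succ (n := m + 1), List.map_append]
    simp [pvCnt]

-- A's fold produces the gather form with pvCnt as the counter
lemma pvA_eq (sl : List String) (indx : List Bool) (m : Nat) :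
    (PySem.List.pyRange 0 (m : Int) 1).foldl
      (fun st i =>
        if PySem.List.pyGetD indx i false then
          (st.1 ++ [PySem.List.pyGetD sl st.2 ""], st.2 + 1)
        else
          (st.1 ++ [""], st.2))
      ([], 0)
    = ((List.range m).map (fun j : Nat =>
          if PySem.List.pyGetD indx (j : Int) false then
            PySem.List.pyGetD sl (pvCnt indx j) ""
          else ""),
        pvCnt indx m) := by
  induction m with
  | zero => simp [pvCnt]
  | succ m ih =>
    have hsucc : PySem.List.pyRange 0 ((m + 1 : Nat) : Int) 1
        = PySem.List.pyRange 0 (m : Int) 1 ++ [(m : Int)] := by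
      push_cast
      exact PySem.List.pyRange_one_succ_right (by positivity)
    rw [hsucc, List.foldl_append, ih, List.foldl_cons, List.foldl_nil]
    by_cases hb : indx[m]?.getD false = true
    · simp [hb, pvCnt, List.range_succ]
    · simp [hb, pvCnt, List.range_succ]

-- ===== VERDICT (by name: the statement is the Claim_ definition above) =====
theorem moveSpanLabels_spec : Claim_equal_moveSpanLabels := by
  intro sl indx n_cols _ _
  unfold Spec_moveSpanLabels moveSpanLabels moveSpanLabels_alt
  by_cases hle : n_cols ≤ 0
  · rw [PySem.List.pyRange_one_eq_nil hle]
    simp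
  · have hn : n_cols = (n_cols.toNat : Int) := (Int.toNat_of_nonneg (by omega)).symm
    rw [hn]
    set n := n_cols.toNat with hdef
    rw [pvPrefix_eq indx n, pvA_eq sl indx n]
    simp only
    rw [PySem.List.pyRange_one (0 : Int) (n : Int)]
    simp only [Int.sub_zero, Int.toNat_natCast, List.map_map]
    apply List.map_congr_left
    intro k hk
    have hkn : k < n := List.mem_range.mp hk
    simp [Nat.lt_succ_of_lt hkn]
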